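-- pv_equiv track=rewrite | github.com/icebear-py/tgvectordb | tgvectordb/ingestors/text_ingestor.py | _code_to_text
-- ===== SOURCE A (Python) =====
-- def _code_to_text(code_content: str, filename: str) -> str:
--     """
--     prepare code for embedding.
--     adds filename as context and cleans up a bit,
--     but preserves the actual code structure because
--     code semantics matter for search.
--     """
--     # add filename as context - helps the embedding model
--     # understand what language / what this file is about
--     header = f"File: {filename}\n\n"
--
--     # strip very long comment blocks at the top (license headers etc)
--     lines = code_content.split("\n")
--     cleaned_lines = []
--     skipping_header_comments = True
--
--     for line in lines:
--         stripped = line.strip()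
--
--         if skipping_header_comments:
--             # skip empty lines and comments at the very top
--             if not stripped:
--                 continue
--             if stripped.startswith(("#!", "//", "/*", " *", "* ", "*/")):
--                 continue
--             if stripped.startswith("#") and len(stripped) > 1:
--                 # could be a python comment or a shebang, check if its a license block
--                 # heuristic: if first 20 lines are all comments, skip them
--                 continue
--             skipping_header_comments = False
--
--         cleaned_lines.append(line)
--
--     # rejoin, but cap it if the file is absurdly long
--     # (we'll chunk it anyway, but no point processing a 50k line file as one blob)
--     code_text = "\n".join(cleaned_lines)
--
--     return header + code_text
-- ===== SOURCE B (Python) =====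
-- def _is_header_line(line: str) -> bool:
--     s = line.strip()
--     return (not s
--             or s.startswith(("#!", "//", "/*", " *", "* ", "*/"))
--             or (s.startswith("#") and len(s) > 1))
--
--
-- def _code_to_text(code_content: str, filename: str) -> str:
--     kept = code_content.split("\n")
--     while kept and _is_header_line(kept[0]):
--         kept = kept[1:]
--     return f"File: {filename}\n\n" + "\n".join(kept)
-- ===== Notes on version B (the rewrite author's own statement) =====
-- stated objective: idiomatic
-- what changed: Replaces the one-way flag-and-accumulate loop over all lines with a named predicate is_header_line and a drop-while over the leading lines, keeping the remainder of the split verbatim.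
import Mathlib
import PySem

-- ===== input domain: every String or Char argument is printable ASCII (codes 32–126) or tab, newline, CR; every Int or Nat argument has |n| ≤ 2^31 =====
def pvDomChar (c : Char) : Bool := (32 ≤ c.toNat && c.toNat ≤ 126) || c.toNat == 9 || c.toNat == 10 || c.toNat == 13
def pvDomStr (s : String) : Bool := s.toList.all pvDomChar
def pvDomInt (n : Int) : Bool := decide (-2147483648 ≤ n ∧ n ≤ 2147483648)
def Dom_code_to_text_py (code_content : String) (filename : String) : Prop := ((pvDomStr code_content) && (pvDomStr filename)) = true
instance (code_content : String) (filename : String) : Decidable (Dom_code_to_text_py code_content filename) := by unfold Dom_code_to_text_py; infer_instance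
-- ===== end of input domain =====

-- B replaces A's one-way flag-and-accumulate loop by a named header-line predicate and a
-- drop-while over the leading lines (idiomatic decomposition; same cost, same return value).

-- ===== PORT A =====
-- A's for-loop with the `skipping_header_comments` flag; branch order preserved (strings as List Char via PySem.Chars).
def pyCleanLoop (lines : List (List Char)) (skipping : Bool) : List (List Char) :=
  match lines with
  | [] => []
  | line :: rest =>
    let stripped := PySem.Chars.strip line
    if skipping then
      if stripped == [] then pyCleanLoop rest skipping   -- `if not stripped`
      else if (PySem.Chars.startswith stripped ['#', '!'] || PySem.Chars.startswith stripped ['/', '/'] ||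
               PySem.Chars.startswith stripped ['/', '*'] || PySem.Chars.startswith stripped [' ', '*'] ||
               PySem.Chars.startswith stripped ['*', ' '] || PySem.Chars.startswith stripped ['*', '/']) then
        pyCleanLoop rest skipping
      else if PySem.Chars.startswith stripped ['#'] && decide (1 < stripped.length) then
        pyCleanLoop rest skipping
      else line :: pyCleanLoop rest false   -- skipping_header_comments = False, then append
    else line :: pyCleanLoop rest skipping

def code_to_text_py (code_content : String) (filename : String) : String :=
  let header := "File: ".toList ++ filename.toList ++ ['\n', '\n']
  let lines := PySem.Chars.splitOn code_content.toList ['\n']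
  let cleaned_lines := pyCleanLoop lines true
  let code_text := PySem.Chars.join ['\n'] cleaned_lines
  String.ofList (header ++ code_text)

-- ===== PORT B =====
def isHeaderLine (line : List Char) : Bool :=
  let s := PySem.Chars.strip line
  s == [] ||
    (PySem.Chars.startswith s ['#', '!'] || PySem.Chars.startswith s ['/', '/'] ||
     PySem.Chars.startswith s ['/', '*'] || PySem.Chars.startswith s [' ', '*'] ||
     PySem.Chars.startswith s ['*', ' '] || PySem.Chars.startswith s ['*', '/']) ||
    (PySem.Chars.startswith s ['#'] && decide (1 < s.length))

def code_to_text_py_alt (code_content : String) (filename : String) : String :=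
  -- Source B's while-pop loop over the front of the list IS List.dropWhile
  let kept := (PySem.Chars.splitOn code_content.toList ['\n']).dropWhile isHeaderLine
  String.ofList ("File: ".toList ++ filename.toList ++ ['\n', '\n'] ++ PySem.Chars.join ['\n'] kept)

-- ===== PRECONDITION & SPEC =====
def Spec_code_to_text_py (code_content : String) (filename : String) (out : String) : Prop := out = code_to_text_py_alt code_content filename
instance (code_content : String) (filename : String) (out : String) : Decidable (Spec_code_to_text_py code_content filename out) := by unfold Spec_code_to_text_py; infer_instance

-- ===== CLAIM (what is proved, stated in full; the proofs are below) =====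
def Claim_equal_code_to_text_py : Prop := ∀ (code_content : String) (filename : String), Dom_code_to_text_py code_content filename → Spec_code_to_text_py code_content filename (code_to_text_py code_content filename)

-- ===== LEMMAS AND PROOFS =====

theorem pyCleanLoop_false (ls : List (List Char)) : pyCleanLoop ls false = ls := by
  induction ls with
  | nil => rfl
  | cons l ls ih => simp [pyCleanLoop, ih]

theorem pyCleanLoop_true (ls : List (List Char)) :
    pyCleanLoop ls true = ls.dropWhile isHeaderLine := by
  induction ls with
  | nil => rfl
  | cons l ls ih =>
    cases h1 : (PySem.Chars.strip l == ([] : List Char)) <;>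
    cases h2 : (PySem.Chars.startswith (PySem.Chars.strip l) ['#', '!'] ||
        PySem.Chars.startswith (PySem.Chars.strip l) ['/', '/'] ||
        PySem.Chars.startswith (PySem.Chars.strip l) ['/', '*'] ||
        PySem.Chars.startswith (PySem.Chars.strip l) [' ', '*'] ||
        PySem.Chars.startswith (PySem.Chars.strip l) ['*', ' '] ||
        PySem.Chars.startswith (PySem.Chars.strip l) ['*', '/']) <;>
    cases h3 : (PySem.Chars.startswith (PySem.Chars.strip l) ['#'] &&
        decide (1 < (PySem.Chars.strip l).length)) <;>
    simp [pyCleanLoop, isHeaderLine, h1, h2, h3, ih, pyCleanLoop_false]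

-- ===== VERDICT (by name: the statement is the Claim_ definition above) =====
theorem code_to_text_py_spec : Claim_equal_code_to_text_py := by
  intro code_content filename _
  unfold Spec_code_to_text_py code_to_text_py code_to_text_py_alt
  simp only [pyCleanLoop_true, List.append_assoc]
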